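-- pv_equiv track=rewrite | github.com/lsst-uk/tidesPhaseC | classifyApp/main.py | commonLinesToArgIndex
-- ===== SOURCE A (Python) =====
-- def commonLinesToArgIndex(inLines):
--     """
--     Processes the commonSNLines dictionary to extract all 'lines' values into a
--     single list and creates a dictionary mapping the original keys to the
--     corresponding indexes in the list.
--
--     Args:
--         inLines (dict): The commonSNLines dictionary.
--
--     Returns:
--         tuple: A tuple containing:
--             - A list of all line values.
--             - A dictionary mapping the original keys to the corresponding
--               indexes in the list.
--     """
--     all_lines = []  # List to store all line values
--     index_mapping = {}  # Dictionary to store the mapping of keys to indexes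
--
--     for key, value in inLines.items():
--         if 'lines' in value:
--             start_index = len(all_lines)  # Start index for this key
--             all_lines.extend(value['lines'])  # Add the lines to the list
--             end_index = len(all_lines)  # End index for this key
--             # Map key to indexes
--             index_mapping[key] = list(
--                 range(start_index, end_index)
--             )
--
--     return all_lines, index_mapping
-- ===== SOURCE B (Python) =====
-- def commonLinesToArgIndex(inLines):
--     # Different decomposition: no lengths, offsets or range() at all.
--     # Build empty index buckets per qualifying key, flatten the lines into a
--     # single key-tagged pair stream, and let enumerate() hand out the indices,
--     # which are grouped back per key by appending.
--     index_mapping = {k: [] for k, v in inLines.items() if 'lines' in v}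
--     pairs = [(k, x) for k, v in inLines.items() if 'lines' in v for x in v['lines']]
--     all_lines = [x for _, x in pairs]
--     for i, (k, _) in enumerate(pairs):
--         index_mapping[k].append(i)
--     return all_lines, index_mapping
-- ===== Notes on version B (the rewrite author's own statement) =====
-- stated objective: alternative
-- what changed: B never computes lengths, offsets or range(): it pre-creates empty index buckets, flattens the lines into one key-tagged pair stream, and groups the indices handed out by enumerate() back per key by appending.
import Mathlib
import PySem

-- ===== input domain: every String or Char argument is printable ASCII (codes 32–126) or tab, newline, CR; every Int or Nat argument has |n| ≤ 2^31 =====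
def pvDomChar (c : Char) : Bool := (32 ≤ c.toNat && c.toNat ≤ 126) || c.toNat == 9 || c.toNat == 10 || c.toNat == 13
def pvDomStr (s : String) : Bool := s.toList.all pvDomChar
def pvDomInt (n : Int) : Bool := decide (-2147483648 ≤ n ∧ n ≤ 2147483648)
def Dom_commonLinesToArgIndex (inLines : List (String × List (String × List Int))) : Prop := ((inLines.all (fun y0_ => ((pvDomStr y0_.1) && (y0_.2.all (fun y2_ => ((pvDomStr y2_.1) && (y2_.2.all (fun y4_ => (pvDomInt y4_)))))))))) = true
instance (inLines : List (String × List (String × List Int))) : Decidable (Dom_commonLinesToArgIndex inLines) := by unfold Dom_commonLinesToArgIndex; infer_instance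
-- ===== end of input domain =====

-- B never computes lengths, offsets or range(): it flattens the lines into one key-tagged
-- pair stream and groups the indices handed out by enumerate back per key; objective:
-- alternative algorithm of the same cost.

-- ===== PORT A =====
-- one loop, extending all_lines and reading its length before/after each extend
def commonLinesToArgIndex (inLines : List (String × List (String × List Int))) : List Int × (List (String × List Int)) :=
  let res := (PySem.Dict.ofList inLines).items.foldl
    (fun (st : List Int × PySem.Dict String (List Int)) kv =>
      let value := PySem.Dict.ofList kv.2
      if value.contains "lines" then
        let start_index : Int := st.1.length
        let all' := st.1 ++ value.getD "lines" []
        let end_index : Int := all'.length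
        (all', st.2.insert kv.1 (PySem.List.pyRange start_index end_index 1))
      else st)
    ([], PySem.Dict.empty)
  (res.1, res.2.items)

-- ===== PORT B =====
-- empty buckets per qualifying key, flat key-tagged pair stream, enumerate + group-by-key
def commonLinesToArgIndex_alt (inLines : List (String × List (String × List Int))) : List Int × (List (String × List Int)) :=
  let items := (PySem.Dict.ofList inLines).items
  let index_mapping := items.foldl
    (fun (d : PySem.Dict String (List Int)) kv =>
      if (PySem.Dict.ofList kv.2).contains "lines" then d.insert kv.1 [] else d)
    PySem.Dict.empty
  let pairs := items.flatMap
    (fun kv =>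
      if (PySem.Dict.ofList kv.2).contains "lines" then
        ((PySem.Dict.ofList kv.2).getD "lines" []).map (fun x => (kv.1, x))
      else [])
  let all_lines := pairs.map (fun p => p.2)
  let fin := (PySem.List.enumerate pairs 0).foldl
    (fun d (q : Int × (String × Int)) => d.modify q.2.1 [] (fun l => l ++ [q.1]))
    index_mapping
  (all_lines, fin.items)

-- ===== PRECONDITION & SPEC =====
def Spec_commonLinesToArgIndex (inLines : List (String × List (String × List Int))) (out : List Int × (List (String × List Int))) : Prop := out = commonLinesToArgIndex_alt inLines
instance (inLines : List (String × List (String × List Int))) (out : List Int × (List (String × List Int))) : Decidable (Spec_commonLinesToArgIndex inLines out) := by unfold Spec_commonLinesToArgIndex; infer_instance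

-- ===== CLAIM =====
def Claim_equal_commonLinesToArgIndex : Prop := ∀ (inLines : List (String × List (String × List Int))), Dom_commonLinesToArgIndex inLines → Spec_commonLinesToArgIndex inLines (commonLinesToArgIndex inLines)

-- ===== LEMMAS AND PROOFS =====

-- A's loop body, named for the induction
def pvStepA (st : List Int × PySem.Dict String (List Int)) (kv : String × List (String × List Int)) : List Int × PySem.Dict String (List Int) :=
  let value := PySem.Dict.ofList kv.2
  if value.contains "lines" then
    let start_index : Int := st.1.length
    let all' := st.1 ++ value.getD "lines" []
    let end_index : Int := all'.length
    (all', st.2.insert kv.1 (PySem.List.pyRange start_index end_index 1))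
  else st

-- running-offset form of A's dict construction (intermediate)
def pvStepB (st : Int × PySem.Dict String (List Int)) (p : String × List Int) : Int × PySem.Dict String (List Int) :=
  (st.1 + p.2.length, st.2.insert p.1 (PySem.List.pyRange st.1 (st.1 + p.2.length) 1))

-- B's loop bodies, named for the inductions
def pvStepIm (d : PySem.Dict String (List Int)) (kv : String × List (String × List Int)) : PySem.Dict String (List Int) :=
  if (PySem.Dict.ofList kv.2).contains "lines" then d.insert kv.1 [] else d

def pvStepGrp (d : PySem.Dict String (List Int)) (q : Int × (String × Int)) : PySem.Dict String (List Int) :=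
  d.modify q.2.1 [] (fun l => l ++ [q.1])

def pvFilt (L : List (String × List (String × List Int))) : List (String × List Int) :=
  L.filterMap (fun kv => ((PySem.Dict.ofList kv.2).get? "lines").map (fun ls => (kv.1, ls)))

def pvPairsOf (F : List (String × List Int)) : List (String × Int) :=
  F.flatMap (fun p => p.2.map (fun x => (p.1, x)))

-- the common normal form both results are brought to
def pvRanges : Int → List (String × List Int) → List (String × List Int)
  | _, [] => []
  | off, (k, ls) :: t => (k, PySem.List.pyRange off (off + ls.length) 1) :: pvRanges (off + ls.length) t

-- A's single loop equals flatten + running-offset fold over the filtered pairs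
theorem pvMain (L : List (String × List (String × List Int)))
    (all : List Int) (im : PySem.Dict String (List Int)) :
    L.foldl pvStepA (all, im)
      = (all ++ (pvFilt L).flatMap (fun p => p.2),
         ((pvFilt L).foldl pvStepB ((all.length : Int), im)).2) := by
  induction L generalizing all im with
  | nil => simp [pvFilt]
  | cons kv t ih =>
    by_cases h : (PySem.Dict.ofList kv.2).contains "lines" = true
    · have hsome : ((PySem.Dict.ofList kv.2).get? "lines").isSome := by
        rw [← PySem.Dict.contains_eq_isSome_get?]; exact h
      obtain ⟨ls, hls⟩ := Option.isSome_iff_exists.1 hsome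
      have hfilt : pvFilt (kv :: t) = (kv.1, ls) :: pvFilt t := by
        simp [pvFilt, hls]
      have hgd : (PySem.Dict.ofList kv.2).getD "lines" [] = ls := by
        rw [PySem.Dict.getD_eq_get?_getD, hls]; rfl
      have hstep : pvStepA (all, im) kv
          = (all ++ ls, im.insert kv.1 (PySem.List.pyRange (all.length : Int) ((all.length : Int) + ls.length) 1)) := by
        simp [pvStepA, h, hgd]
      rw [List.foldl_cons, hstep, ih, hfilt]
      simp [pvStepB, List.flatMap_cons, List.append_assoc]
    · have hnone : (PySem.Dict.ofList kv.2).get? "lines" = none := by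
        rw [← Option.not_isSome_iff_eq_none, ← PySem.Dict.contains_eq_isSome_get?]
        simpa using h
      have hfilt : pvFilt (kv :: t) = pvFilt t := by simp [pvFilt, hnone]
      have hstep : pvStepA (all, im) kv = (all, im) := by simp [pvStepA, h]
      rw [List.foldl_cons, hstep, ih, hfilt]

-- the running-offset fold over fresh distinct keys appends the index ranges in order
theorem pvAfold (F : List (String × List Int)) (off : Int)
    (im : PySem.Dict String (List Int))
    (hfresh : ∀ k ∈ F.map Prod.fst, im.contains k = false)
    (hnd : (F.map Prod.fst).Nodup) :
    (F.foldl pvStepB (off, im)).2.items = im.items ++ pvRanges off F := by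
  induction F generalizing off im with
  | nil => simp [pvRanges]
  | cons p t ih =>
    obtain ⟨k, ls⟩ := p
    simp only [List.map_cons, List.nodup_cons] at hnd
    have hk : im.contains k = false := hfresh k (by simp)
    have hstep : pvStepB (off, im) (k, ls)
        = (off + ls.length, im.insert k (PySem.List.pyRange off (off + ls.length) 1)) := rfl
    rw [List.foldl_cons, hstep]
    rw [ih (off + ls.length) _
      (by
        intro k' hk'
        rw [PySem.Dict.contains_insert]
        have hne : k' ≠ k := fun he => hnd.1 (he ▸ hk')
        simp [hne, hfresh k' (by simp [hk'])])
      hnd.2]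
    rw [PySem.Dict.items_insert, hk]
    simp [pvRanges]

-- B's first loop builds the empty buckets: one (key, []) per filtered pair, in order
theorem pvIm_char (L : List (String × List (String × List Int)))
    (d : PySem.Dict String (List Int))
    (hfresh : ∀ k ∈ (pvFilt L).map Prod.fst, d.contains k = false)
    (hnd : ((pvFilt L).map Prod.fst).Nodup) :
    (L.foldl pvStepIm d).items = d.items ++ (pvFilt L).map (fun p => (p.1, ([] : List Int))) := by
  induction L generalizing d with
  | nil => simp [pvFilt]
  | cons kv t ih =>
    by_cases h : (PySem.Dict.ofList kv.2).contains "lines" = true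
    · have hsome : ((PySem.Dict.ofList kv.2).get? "lines").isSome := by
        rw [← PySem.Dict.contains_eq_isSome_get?]; exact h
      obtain ⟨ls, hls⟩ := Option.isSome_iff_exists.1 hsome
      have hfilt : pvFilt (kv :: t) = (kv.1, ls) :: pvFilt t := by
        simp [pvFilt, hls]
      rw [hfilt] at hfresh hnd
      simp only [List.map_cons, List.nodup_cons] at hnd
      have hk : d.contains kv.1 = false := hfresh kv.1 (by simp)
      have hstep : pvStepIm d kv = d.insert kv.1 [] := by simp [pvStepIm, h]
      rw [List.foldl_cons, hstep]
      rw [ih _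
        (by
          intro k' hk'
          rw [PySem.Dict.contains_insert]
          have hne : k' ≠ kv.1 := fun he => hnd.1 (he ▸ hk')
          simp [hne, hfresh k' (by simp [hk'])])
        hnd.2]
      rw [PySem.Dict.items_insert, hk]
      simp [hfilt]
    · have hnone : (PySem.Dict.ofList kv.2).get? "lines" = none := by
        rw [← Option.not_isSome_iff_eq_none, ← PySem.Dict.contains_eq_isSome_get?]
        simpa using h
      have hfilt : pvFilt (kv :: t) = pvFilt t := by simp [pvFilt, hnone]
      rw [hfilt] at hfresh hnd
      have hstep : pvStepIm d kv = d := by simp [pvStepIm, h]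
      rw [List.foldl_cons, hstep, ih _ hfresh hnd, hfilt]

-- B's pair comprehension equals the flat tagged stream of the filtered pairs
theorem pvPairs_char (L : List (String × List (String × List Int))) :
    L.flatMap (fun kv =>
      if (PySem.Dict.ofList kv.2).contains "lines" then
        ((PySem.Dict.ofList kv.2).getD "lines" []).map (fun x => (kv.1, x))
      else []) = pvPairsOf (pvFilt L) := by
  induction L with
  | nil => simp [pvFilt, pvPairsOf]
  | cons kv t ih =>
    by_cases h : (PySem.Dict.ofList kv.2).contains "lines" = true
    · have hsome : ((PySem.Dict.ofList kv.2).get? "lines").isSome := by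
        rw [← PySem.Dict.contains_eq_isSome_get?]; exact h
      obtain ⟨ls, hls⟩ := Option.isSome_iff_exists.1 hsome
      have hfilt : pvFilt (kv :: t) = (kv.1, ls) :: pvFilt t := by
        simp [pvFilt, hls]
      have hgd : (PySem.Dict.ofList kv.2).getD "lines" [] = ls := by
        rw [PySem.Dict.getD_eq_get?_getD, hls]; rfl
      rw [List.flatMap_cons, ih, hfilt]
      simp [pvPairsOf, h, hgd]
    · have hnone : (PySem.Dict.ofList kv.2).get? "lines" = none := by
        rw [← Option.not_isSome_iff_eq_none, ← PySem.Dict.contains_eq_isSome_get?]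
        simpa using h
      have hfilt : pvFilt (kv :: t) = pvFilt t := by simp [pvFilt, hnone]
      rw [List.flatMap_cons, ih, hfilt]
      simp [h]

-- dropping the key tags from the flat stream gives the flattened lines
theorem pvPairs_snd (F : List (String × List Int)) :
    (pvPairsOf F).map (fun p => p.2) = F.flatMap (fun p => p.2) := by
  induction F with
  | nil => rfl
  | cons p t ih => simp [pvPairsOf, List.flatMap_cons, List.map_map] at ih ⊢; exact ih

-- appending a run of same-key pairs into the bucket at k (an in-place update)
theorem pvInner (k : String) :
    ∀ (E : List (Int × (String × Int))), (∀ q ∈ E, q.2.1 = k) →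
    ∀ (d : PySem.Dict String (List Int)) (pre rest : List (String × List Int)) (v0 : List Int),
      d.items = pre ++ (k, v0) :: rest →
      (pre.map Prod.fst ++ k :: rest.map Prod.fst).Nodup →
      (E.foldl pvStepGrp d).items = pre ++ (k, v0 ++ E.map (fun q => q.1)) :: rest := by
  intro E
  induction E with
  | nil =>
    intro _ d pre rest v0 hitems _
    simpa using hitems
  | cons q E' ih =>
    intro hE d pre rest v0 hitems hnd
    obtain ⟨hnd1, hnd2, hdisj⟩ := List.nodup_append.1 hnd
    have hkpre : k ∉ pre.map Prod.fst := fun hkp => (hdisj k hkp k (by simp)) rfl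
    have hkrest : k ∉ rest.map Prod.fst := (List.nodup_cons.1 hnd2).1
    have hq : q.2.1 = k := hE q (by simp)
    have hkeys : d.keys = pre.map Prod.fst ++ k :: rest.map Prod.fst := by
      show d.items.map Prod.fst = _
      rw [hitems]; simp
    have hndk : d.keys.Nodup := by rw [hkeys]; exact hnd
    have hmem : (k, v0) ∈ d.items := by rw [hitems]; simp
    have hget : d.getD k [] = v0 := by
      apply PySem.Dict.getD_of_mem_items <;> first | exact hmem | exact hndk
    have hcont : d.contains k = true := by
      rw [PySem.Dict.contains_iff_mem_keys, hkeys]; simp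
    have hstep : pvStepGrp d q = d.insert k (v0 ++ [q.1]) := by
      show d.modify q.2.1 [] (fun l => l ++ [q.1]) = _
      rw [hq]
      show d.insert k ((d.getD k []) ++ [q.1]) = _
      rw [hget]
    have hpre : pre.map (fun p => if p.1 == k then (k, v0 ++ [q.1]) else p) = pre := by
      have h1 : pre.map (fun p => if p.1 == k then (k, v0 ++ [q.1]) else p) = pre.map id := by
        apply List.map_congr_left
        intro p hp
        have hne : p.1 ≠ k := fun he => hkpre (he ▸ List.mem_map_of_mem hp)
        simp [hne]
      rw [h1, List.map_id]
    have hrest : rest.map (fun p => if p.1 == k then (k, v0 ++ [q.1]) else p) = rest := by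
      have h1 : rest.map (fun p => if p.1 == k then (k, v0 ++ [q.1]) else p) = rest.map id := by
        apply List.map_congr_left
        intro p hp
        have hne : p.1 ≠ k := fun he => hkrest (he ▸ List.mem_map_of_mem hp)
        simp [hne]
      rw [h1, List.map_id]
    have hitems' : (d.insert k (v0 ++ [q.1])).items = pre ++ (k, v0 ++ [q.1]) :: rest := by
      rw [PySem.Dict.items_insert, hcont]
      simp only [if_true, hitems, List.map_append, List.map_cons]
      rw [hpre, hrest]
      simp
    rw [List.foldl_cons, hstep]
    rw [ih (fun q' hq' => hE q' (List.mem_cons_of_mem _ hq')) _ pre rest (v0 ++ [q.1]) hitems' hnd]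
    simp

-- the grouping loop over the enumerated flat stream fills the buckets with the index ranges
theorem pvGrp (F : List (String × List Int)) :
    ∀ (s : Int) (d : PySem.Dict String (List Int)) (pre : List (String × List Int)),
      d.items = pre ++ F.map (fun p => (p.1, ([] : List Int))) →
      (pre.map Prod.fst ++ F.map Prod.fst).Nodup →
      ((PySem.List.enumerate (pvPairsOf F) s).foldl pvStepGrp d).items = pre ++ pvRanges s F := by
  induction F with
  | nil =>
    intro s d pre hitems _
    simpa [pvPairsOf, pvRanges] using hitems
  | cons p t ih =>
    intro s d pre hitems hnd
    obtain ⟨k, ls⟩ := p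
    have hsplit : pvPairsOf ((k, ls) :: t) = ls.map (fun x => (k, x)) ++ pvPairsOf t := by
      simp [pvPairsOf]
    rw [hsplit, PySem.List.enumerate_append, List.foldl_append]
    simp only [List.length_map]
    have hE1 : ∀ q ∈ PySem.List.enumerate (ls.map (fun x => (k, x))) s, (q.2).1 = k := by
      intro q hq
      have h2 : q.2 ∈ (PySem.List.enumerate (ls.map (fun x => (k, x))) s).map (fun r => r.2) :=
        List.mem_map_of_mem hq
      rw [PySem.List.map_snd_enumerate] at h2
      obtain ⟨x, _, he⟩ := List.mem_map.1 h2
      rw [← he]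
    have hnd' : (pre.map Prod.fst ++ k :: t.map Prod.fst).Nodup := by
      simpa using hnd
    have hitems1 : d.items = pre ++ (k, ([] : List Int)) :: t.map (fun p => (p.1, ([] : List Int))) := by
      simpa using hitems
    have h1 := pvInner k (PySem.List.enumerate (ls.map (fun x => (k, x))) s) hE1 d pre
      (t.map (fun p => (p.1, ([] : List Int)))) [] hitems1
      (by simpa [List.map_map] using hnd')
    have hidx : (PySem.List.enumerate (ls.map (fun x => (k, x))) s).map (fun q => q.1)
        = PySem.List.pyRange s (s + (ls.length : Int)) 1 := by
      rw [PySem.List.map_fst_enumerate]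
      simp
    rw [hidx] at h1
    have h2 := ih (s + (ls.length : Int)) _ (pre ++ [(k, PySem.List.pyRange s (s + (ls.length : Int)) 1)])
      (by rw [h1]; simp)
      (by simpa [List.append_assoc] using hnd')
    rw [h2]
    simp [pvRanges]

-- filtered keys are a sublist of the dict's keys, hence Nodup
theorem pvFilt_keys_sublist (L : List (String × List (String × List Int))) :
    List.Sublist ((pvFilt L).map Prod.fst) (L.map Prod.fst) := by
  induction L with
  | nil => simp [pvFilt]
  | cons kv t ih =>
    cases h : (PySem.Dict.ofList kv.2).get? "lines" with
    | none =>
      have : pvFilt (kv :: t) = pvFilt t := by simp [pvFilt, h]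
      rw [this, List.map_cons]
      exact ih.cons _
    | some ls =>
      have : pvFilt (kv :: t) = (kv.1, ls) :: pvFilt t := by simp [pvFilt, h]
      rw [this, List.map_cons, List.map_cons]
      exact ih.cons₂ _

-- ===== VERDICT =====
theorem commonLinesToArgIndex_spec : Claim_equal_commonLinesToArgIndex := by
  intro inLines _
  show commonLinesToArgIndex inLines = commonLinesToArgIndex_alt inLines
  have hnd : ((pvFilt (PySem.Dict.ofList inLines).items).map Prod.fst).Nodup :=
    (PySem.Dict.nodup_keys_ofList inLines).sublist
      (pvFilt_keys_sublist (PySem.Dict.ofList inLines).items)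
  -- A's side
  have e1 : commonLinesToArgIndex inLines
      = (((PySem.Dict.ofList inLines).items.foldl pvStepA ([], PySem.Dict.empty)).1,
         ((PySem.Dict.ofList inLines).items.foldl pvStepA ([], PySem.Dict.empty)).2.items) := rfl
  have hA0 := pvAfold (pvFilt (PySem.Dict.ofList inLines).items) 0 PySem.Dict.empty
    (by intro k _; simp [PySem.Dict.contains_empty]) hnd
  rw [e1, pvMain]
  simp only [List.length_nil, Nat.cast_zero, List.nil_append]
  rw [hA0]
  -- B's side
  have e2 : commonLinesToArgIndex_alt inLines
      = (((PySem.Dict.ofList inLines).items.flatMap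
            (fun kv =>
              if (PySem.Dict.ofList kv.2).contains "lines" then
                ((PySem.Dict.ofList kv.2).getD "lines" []).map (fun x => (kv.1, x))
              else [])).map (fun p => p.2),
         ((PySem.List.enumerate
            ((PySem.Dict.ofList inLines).items.flatMap
              (fun kv =>
                if (PySem.Dict.ofList kv.2).contains "lines" then
                  ((PySem.Dict.ofList kv.2).getD "lines" []).map (fun x => (kv.1, x))
                else [])) 0).foldl pvStepGrp
            ((PySem.Dict.ofList inLines).items.foldl pvStepIm PySem.Dict.empty)).items) := rfl
  rw [e2, pvPairs_char, pvPairs_snd]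
  have hIm := pvIm_char (PySem.Dict.ofList inLines).items PySem.Dict.empty
    (by intro k _; simp [PySem.Dict.contains_empty]) hnd
  have hG := pvGrp (pvFilt (PySem.Dict.ofList inLines).items) 0
    ((PySem.Dict.ofList inLines).items.foldl pvStepIm PySem.Dict.empty) []
    (by rw [hIm]; simp [PySem.Dict.empty])
    (by simpa using hnd)
  rw [hG]
  simp [PySem.Dict.empty]
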